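-- pv_equiv track=rewrite | github.com/songjinghe/research-units-pipeline-skills | tooling/review_render.py | render_claims_markdown
-- ===== SOURCE A (Python) =====
-- def render_claims_markdown(claims: list[dict[str, str]]) -> str:
--     empirical = [c for c in claims if c.get("type") == "empirical"]
--     conceptual = [c for c in claims if c.get("type") == "conceptual"]
--     lines = ["# Claims", ""]
--     for title, bucket in (("Empirical claims", empirical), ("Conceptual claims", conceptual)):
--         lines.extend([f"## {title}", ""])
--         if not bucket:
--             lines.append("- (none)")
--             lines.append("")
--             continue
--         for claim in bucket:
--             lines.extend(
--                 [
--                     f"### {claim['id']}",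
--                     f"- Claim: {claim['claim']}",
--                     f"- Type: {claim['type']}",
--                     f"- Scope: {claim['scope']}",
--                     f"- Source: {claim['source']}",
--                     "",
--                 ]
--             )
--     return "\n".join(lines).rstrip() + "\n"
-- ===== SOURCE B (Python) =====
-- def render_claims_markdown(claims: list[dict[str, str]]) -> str:
--     # single pass: stream each matching claim straight into its section's text,
--     # no intermediate line list, no join
--     emp = ""
--     con = ""
--     for c in claims:
--         t = c.get("type")
--         if t == "empirical" or t == "conceptual":
--             block = (
--                 f"### {c['id']}\n"
--                 f"- Claim: {c['claim']}\n"
--                 f"- Type: {c['type']}\n"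
--                 f"- Scope: {c['scope']}\n"
--                 f"- Source: {c['source']}\n\n"
--             )
--             if t == "empirical":
--                 emp += block
--             else:
--                 con += block
--     text = (
--         "# Claims\n\n## Empirical claims\n\n"
--         + (emp or "- (none)\n\n")
--         + "## Conceptual claims\n\n"
--         + (con or "- (none)\n\n")
--     )
--     return text.rstrip() + "\n"
-- ===== Notes on version B (the rewrite author's own statement) =====
-- stated objective: alternative
-- what changed: Instead of A's two filtering passes plus a line-list joined at the end, B makes a single streaming pass that formats each matching claim immediately and appends its block to one of two growing section strings, then concatenates the fixed headers with the two bodies directly (no intermediate lists, no join).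
import Mathlib
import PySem

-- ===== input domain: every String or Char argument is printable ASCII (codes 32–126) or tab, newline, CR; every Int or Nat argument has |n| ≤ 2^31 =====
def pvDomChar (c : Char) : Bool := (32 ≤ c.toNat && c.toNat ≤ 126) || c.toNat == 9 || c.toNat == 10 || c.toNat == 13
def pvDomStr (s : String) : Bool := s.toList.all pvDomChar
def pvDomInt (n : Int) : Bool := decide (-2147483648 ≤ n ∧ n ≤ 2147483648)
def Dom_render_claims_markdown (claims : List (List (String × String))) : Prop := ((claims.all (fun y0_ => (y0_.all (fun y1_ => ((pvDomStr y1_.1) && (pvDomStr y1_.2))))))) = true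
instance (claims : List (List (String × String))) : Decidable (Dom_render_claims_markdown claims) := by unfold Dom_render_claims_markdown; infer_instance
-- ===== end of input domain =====

-- B streams claims once into two growing section strings (no filtered lists, no line list, no join);
-- return values proved equal on Pre_.

-- c.get("type") — the same lookup both Pythons perform
def pvKey (c : List (String × String)) : Option String := (PySem.Dict.mk c).get? "type"

-- claim[k]; Pre_ guarantees the key is present on the claims that are rendered
def pvField (c : List (String × String)) (k : String) : String :=
  ((PySem.Dict.mk c).get? k).getD ""

-- ===== PORT A =====
-- the six lines A's inner loop appends for one claim
def pvEntry (c : List (String × String)) : List String :=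
  ["### " ++ pvField c "id", "- Claim: " ++ pvField c "claim", "- Type: " ++ pvField c "type",
   "- Scope: " ++ pvField c "scope", "- Source: " ++ pvField c "source", ""]

def render_claims_markdown (claims : List (List (String × String))) : String :=
  let empirical := claims.filter (fun c => pvKey c == some "empirical")
  let conceptual := claims.filter (fun c => pvKey c == some "conceptual")
  let lines := ["# Claims", ""]
  let lines := [("Empirical claims", empirical), ("Conceptual claims", conceptual)].foldl
    (fun lines tb =>
      let lines := lines ++ ["## " ++ tb.1, ""]
      if tb.2.isEmpty then lines ++ ["- (none)", ""]
      else tb.2.foldl (fun lines c => lines ++ pvEntry c) lines) lines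
  PySem.Str.rstrip (PySem.Str.join "\n" lines) ++ "\n"

-- ===== PORT B =====
-- B's one f-string block for a claim (literal text with the interpolated fields)
def pvBlock (c : List (String × String)) : String :=
  "### " ++ pvField c "id" ++ "\n- Claim: " ++ pvField c "claim" ++ "\n- Type: " ++ pvField c "type"
    ++ "\n- Scope: " ++ pvField c "scope" ++ "\n- Source: " ++ pvField c "source" ++ "\n\n"

def render_claims_markdown_alt (claims : List (List (String × String))) : String :=
  let p := claims.foldl
    (fun (p : String × String) c =>
      match pvKey c with
      | some t =>
        if t == "empirical" then (p.1 ++ pvBlock c, p.2)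
        else if t == "conceptual" then (p.1, p.2 ++ pvBlock c)
        else p
      | none => p)
    ("", "")
  let text := "# Claims\n\n## Empirical claims\n\n"
    ++ (if p.1 == "" then "- (none)\n\n" else p.1)
    ++ "## Conceptual claims\n\n"
    ++ (if p.2 == "" then "- (none)\n\n" else p.2)
  PySem.Str.rstrip text ++ "\n"

-- ===== PRECONDITION & SPEC =====
-- Pre_ excludes exactly the inputs where Python A raises KeyError: a claim typed
-- "empirical"/"conceptual" that lacks one of the keys id/claim/scope/source.
def Pre_render_claims_markdown (claims : List (List (String × String))) : Prop :=
  ∀ c ∈ claims,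
    ((PySem.Dict.mk c).get? "type" = some "empirical" ∨ (PySem.Dict.mk c).get? "type" = some "conceptual") →
      (((PySem.Dict.mk c).get? "id").isSome ∧ ((PySem.Dict.mk c).get? "claim").isSome ∧
       ((PySem.Dict.mk c).get? "scope").isSome ∧ ((PySem.Dict.mk c).get? "source").isSome)
instance (claims : List (List (String × String))) : Decidable (Pre_render_claims_markdown claims) := by
  unfold Pre_render_claims_markdown; infer_instance

def pvWitness_render_claims_markdown : (List (List (String × String))) :=
  [[("type", "empirical"), ("id", "C1"), ("claim", "water is wet"), ("scope", "lab"), ("source", "s1")],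
   [("type", "other")]]

def Spec_render_claims_markdown (claims : List (List (String × String))) (out : String) : Prop := out = render_claims_markdown_alt claims
instance (claims : List (List (String × String))) (out : String) : Decidable (Spec_render_claims_markdown claims out) := by unfold Spec_render_claims_markdown; infer_instance

-- ===== CLAIM (what is proved, stated in full; the proofs are below) =====
def Claim_equal_render_claims_markdown : Prop := ∀ (claims : List (List (String × String))), Dom_render_claims_markdown claims → Pre_render_claims_markdown claims → Spec_render_claims_markdown claims (render_claims_markdown claims)

-- ===== LEMMAS AND PROOFS =====

-- each line followed by a newline, concatenated (the char-level picture shared by both renderings)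
def nlLines (xs : List String) : List Char := (xs.map (fun s => s.toList ++ ['\n'])).flatten

theorem nlLines_append (xs ys : List String) : nlLines (xs ++ ys) = nlLines xs ++ nlLines ys := by
  simp [nlLines]

-- joining a NONEMPTY line list with "\n" and adding one final "\n" is nlLines
theorem join_newline (xs : List String) (h : xs ≠ []) :
    PySem.Chars.join ['\n'] (xs.map String.toList) ++ ['\n'] = nlLines xs := by
  induction xs with
  | nil => exact absurd rfl h
  | cons x t ih =>
    cases t with
    | nil => simp [PySem.Chars.join, nlLines, List.intercalate]
    | cons y u =>
      have := ih (by simp)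
      simp only [PySem.Chars.join, List.map_cons, List.intercalate, List.intersperse] at this ⊢
      simp only [nlLines, List.map_cons, List.flatten_cons] at this ⊢
      simp only [List.append_assoc] at this ⊢
      rw [← this]

-- rstrip swallows a trailing newline
theorem rstrip_append_newline (s : List Char) :
    PySem.Chars.rstrip (s ++ ['\n']) = PySem.Chars.rstrip s := by
  simp [PySem.Chars.rstrip, PySem.Chars.isspace]

-- B's block is exactly the six A-lines rendered with newlines
theorem nlLines_entry (c : List (String × String)) :
    nlLines (pvEntry c) = (pvBlock c).toList := by
  simp only [pvEntry, pvBlock, nlLines, List.map_cons, List.map_nil, List.flatten_cons,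
    List.flatten_nil, String.toList_append, List.append_nil, List.append_assoc]
  rfl

-- the string B accumulates for one bucket, as a fold
def pvBlocks (l : List (List (String × String))) : String :=
  l.foldl (fun s c => s ++ pvBlock c) ""

theorem pvBlocks_toList (l : List (List (String × String))) (s : String) :
    (l.foldl (fun s c => s ++ pvBlock c) s).toList = s.toList ++ nlLines (l.flatMap pvEntry) := by
  induction l generalizing s with
  | nil => simp [nlLines]
  | cons c t ih => simp [ih, nlLines_append, nlLines_entry]

-- B's single pass computes the two filtered buckets' block strings
theorem pvFold_eq (l : List (List (String × String))) (p : String × String) :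
    l.foldl
      (fun (p : String × String) c =>
        match pvKey c with
        | some t =>
          if t == "empirical" then (p.1 ++ pvBlock c, p.2)
          else if t == "conceptual" then (p.1, p.2 ++ pvBlock c)
          else p
        | none => p) p
    = (p.1 ++ pvBlocks (l.filter (fun c => pvKey c == some "empirical")),
       p.2 ++ pvBlocks (l.filter (fun c => pvKey c == some "conceptual"))) := by
  induction l generalizing p with
  | nil => simp [pvBlocks]
  | cons c t ih =>
    simp only [List.foldl_cons, List.filter_cons]
    cases hk : pvKey c with
    | none =>
      rw [ih]
      simp
    | some ty =>
      by_cases he : ty = "empirical"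
      · subst he
        simp only [beq_self_eq_true, if_true]
        rw [ih]
        refine Prod.ext ?_ rfl
        apply String.toList_inj.mp
        simp [pvBlocks, pvBlocks_toList]
      · by_cases hc : ty = "conceptual"
        · subst hc
          have h1 : (some "conceptual" == some "empirical") = false := by decide
          simp only [h1, beq_self_eq_true, if_true, show (("conceptual" == "empirical") = false) by decide]
          rw [ih]
          refine Prod.ext rfl ?_
          apply String.toList_inj.mp
          simp [pvBlocks, pvBlocks_toList]
        · have h1 : (some ty == some "empirical") = false := by simp [he]
          have h2 : (some ty == some "conceptual") = false := by simp [hc]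
          have b1 : ((ty == "empirical") = false) := by simp [he]
          have b2 : ((ty == "conceptual") = false) := by simp [hc]
          simp only [b1, b2, h1, h2]
          rw [ih]
          simp

-- a bucket's block string is empty exactly when the bucket is
theorem pvBlocks_eq_empty_iff (l : List (List (String × String))) :
    (pvBlocks l == "") = l.isEmpty := by
  cases l with
  | nil => simp [pvBlocks]
  | cons c t =>
    have hne : pvBlocks (c :: t) ≠ "" := by
      intro he
      have := congrArg String.toList he
      rw [pvBlocks, pvBlocks_toList] at this
      simp [nlLines_append, nlLines_entry, pvBlock] at this
    simp [hne]

-- ===== VERDICT (by name: the statement is the Claim_ definition above) =====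
theorem nlLines_blocks (l : List (List (String × String))) :
    nlLines (l.flatMap pvEntry) = (pvBlocks l).toList := by
  rw [pvBlocks, pvBlocks_toList]; rfl

theorem nlLines_none : nlLines ["- (none)", ""] = "- (none)\n\n".toList := rfl

theorem pvAssemble (LE LC : List String) (e c : String)
    (hE : nlLines LE = e.toList) (hC : nlLines LC = c.toList) :
    PySem.Str.rstrip (PySem.Str.join "\n"
        ((["# Claims", ""] ++ ["## " ++ "Empirical claims", ""] ++ LE) ++ ["## " ++ "Conceptual claims", ""] ++ LC)) ++ "\n"
      = PySem.Str.rstrip (("# Claims\n\n## Empirical claims\n\n" ++ e) ++ "## Conceptual claims\n\n" ++ c) ++ "\n" := by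
  apply String.toList_inj.mp
  simp only [String.toList_append, PySem.Str.toList_rstrip, PySem.Str.toList_join]
  congr 1
  rw [← rstrip_append_newline (PySem.Chars.join "\n".toList
        (List.map String.toList ((["# Claims", ""] ++ ["## " ++ "Empirical claims", ""] ++ LE) ++ ["## " ++ "Conceptual claims", ""] ++ LC)))]
  congr 1
  rw [show ("\n".toList = ['\n']) from rfl, join_newline _ (by simp)]
  have h1 : nlLines ["# Claims", ""] = "# Claims\n\n".toList := rfl
  have h2 : nlLines ["## " ++ "Empirical claims", ""] = "## Empirical claims\n\n".toList := rfl
  have h3 : nlLines ["## " ++ "Conceptual claims", ""] = "## Conceptual claims\n\n".toList := rfl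
  simp only [nlLines_append, hE, hC, h1, h2, h3, List.append_assoc]
  rfl

theorem render_claims_markdown_spec : Claim_equal_render_claims_markdown := by
  intro claims _ _
  unfold Spec_render_claims_markdown render_claims_markdown render_claims_markdown_alt
  rw [pvFold_eq]
  simp only [List.foldl_cons, List.foldl_nil, PySem.List.foldl_append_eq_flatMap,
    String.empty_append, pvBlocks_eq_empty_iff]
  split_ifs with h1 h2 h3 <;>
    exact pvAssemble _ _ _ _ (by first | exact nlLines_none | exact nlLines_blocks _)
      (by first | exact nlLines_none | exact nlLines_blocks _)
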